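-- pv_equiv track=rewrite | github.com/errorcorrectionzoo/eczoo_data | scripts/children.py | find_recursive_children
-- ===== SOURCE A (Python) =====
-- def find_recursive_children(code_id: str, parent_to_children: dict[str, set[str]]) -> list[str]:
--     visited: set[str] = set()
--     ordered_children: list[str] = []
--
--     def visit(parent_id: str) -> None:
--         for child_id in sorted(parent_to_children.get(parent_id, set())):
--             if child_id in visited:
--                 continue
--
--             visited.add(child_id)
--             ordered_children.append(child_id)
--             visit(child_id)
--
--     visit(code_id)
--     return ordered_children
-- ===== SOURCE B (Python) =====
-- def find_recursive_children(code_id: str, parent_to_children: dict[str, set[str]]) -> list[str]: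
--     visited: set[str] = set()
--     ordered: list[str] = []
--     stack = [iter(sorted(parent_to_children.get(code_id, set())))]
--     while stack:
--         for child_id in stack[-1]:
--             if child_id not in visited:
--                 visited.add(child_id)
--                 ordered.append(child_id)
--                 stack.append(iter(sorted(parent_to_children.get(child_id, set()))))
--                 break
--         else:
--             stack.pop()
--     return ordered
-- ===== Notes on version B (the rewrite author's own statement) =====
-- stated objective: alternative
-- what changed: Replaces the recursive DFS helper with an explicit iterator-stack DFS: a stack of iterators over sorted child lists is advanced, skipping visited children and pushing a new iterator on each first visit, preserving order and visited timing.
import Mathlib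
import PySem

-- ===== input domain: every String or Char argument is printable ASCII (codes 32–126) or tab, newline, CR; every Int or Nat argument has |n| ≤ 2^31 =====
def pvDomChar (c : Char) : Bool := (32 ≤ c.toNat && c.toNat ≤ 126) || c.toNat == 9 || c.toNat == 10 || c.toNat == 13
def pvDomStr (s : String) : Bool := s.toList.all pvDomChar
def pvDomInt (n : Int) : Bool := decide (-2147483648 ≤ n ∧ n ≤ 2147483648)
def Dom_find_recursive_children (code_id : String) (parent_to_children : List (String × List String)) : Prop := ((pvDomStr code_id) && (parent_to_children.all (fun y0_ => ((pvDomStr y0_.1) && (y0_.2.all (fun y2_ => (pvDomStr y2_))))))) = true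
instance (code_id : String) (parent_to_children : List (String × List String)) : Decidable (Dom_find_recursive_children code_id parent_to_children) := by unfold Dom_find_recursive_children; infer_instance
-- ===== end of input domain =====

-- B replaces A's recursive DFS helper by an explicit iterator-stack DFS (same order, same visited timing); objective: alternative decomposition.

-- shared by both ports: sorted(parent_to_children.get(k, set())) (assoc-list lookup = first match)
def pvSortedChildren (pt : List (String × List String)) (k : String) : List String :=
  PySem.List.sorted ((List.lookup k pt).getD []) (fun x => x) false

-- all children values of the dict (used only as A's fuel bound and B's termination measure)
def pvU (pt : List (String × List String)) : List String := pt.flatMap (·.2)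

-- needed by pvStepB's termination proof: every sorted child list is contained in pvU
theorem pvSortedChildren_subset (pt : List (String × List String)) (k : String) :
    ∀ x ∈ pvSortedChildren pt k, x ∈ pvU pt := by
  intro x hx
  rw [pvSortedChildren, PySem.List.mem_sorted] at hx
  induction pt with
  | nil => simp [List.lookup] at hx
  | cons p rest ih =>
    obtain ⟨a, l⟩ := p
    simp only [pvU, List.flatMap_cons, List.mem_append]
    by_cases h : k == a
    · simp [List.lookup, h] at hx
      exact Or.inl hx
    · simp only [List.lookup, h] at hx
      exact Or.inr (ih hx)
def pvStepB (pt : List (String × List String)) :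
    List (List String) → List String → List String → List String × List String
  | [], v, o => (v, o)
  | [] :: stk, v, o => pvStepB pt stk v o
  | (c :: cs) :: stk, v, o =>
    if c ∈ v then pvStepB pt (cs :: stk) v o
    else pvStepB pt (pvSortedChildren pt c :: cs :: stk) (PySem.Set.add v c) (o ++ [c])
  termination_by stk v _ =>
    ((((pvU pt) ++ stk.flatten).toFinset \ v.toFinset).card, (stk.map (fun l => l.length + 1)).sum)
  decreasing_by
  · simp only [List.flatten_cons, List.nil_append]
    apply Prod.Lex.right
    simp
  · rename_i hcv
    have hset : (pvU pt ++ (cs :: stk).flatten).toFinset \ v.toFinset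
        = (pvU pt ++ ((c :: cs) :: stk).flatten).toFinset \ v.toFinset := by
      ext x
      simp only [Finset.mem_sdiff, List.mem_toFinset, List.mem_append, List.flatten_cons,
        List.mem_cons]
      constructor
      · rintro ⟨hx, hv⟩
        exact ⟨by tauto, hv⟩
      · rintro ⟨hx, hv⟩
        refine ⟨?_, hv⟩
        rcases hx with h1 | h1
        · exact Or.inl h1
        · rcases h1 with h1 | h1
          · rcases h1 with rfl | h1
            · exact absurd hcv hv
            · exact Or.inr (Or.inl h1)
          · exact Or.inr (Or.inr h1)
    rw [hset]
    apply Prod.Lex.right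
    simp
  · rename_i hcv
    have hadd : PySem.Set.add v c = v ++ [c] := by
      simp [PySem.Set.add, PySem.Set.contains, hcv]
    rw [hadd]
    apply Prod.Lex.left
    apply Finset.card_lt_card
    constructor
    · intro x hx
      simp only [Finset.mem_sdiff, List.mem_toFinset, List.mem_append, List.flatten_cons,
        List.mem_cons, List.mem_append] at hx ⊢
      obtain ⟨hx1, hx2⟩ := hx
      push Not at hx2
      refine ⟨?_, hx2.1⟩
      rcases hx1 with h1 | h1
      · exact Or.inl h1
      · rcases h1 with h1 | h1
        · exact Or.inl (pvSortedChildren_subset pt c x h1)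
        · rcases h1 with h1 | h1
          · exact Or.inr (Or.inl (Or.inr h1))
          · exact Or.inr (Or.inr h1)
    · intro hsub
      have hc : c ∈ (pvU pt ++ ((c :: cs) :: stk).flatten).toFinset \ v.toFinset := by
        simp [hcv]
      have h2 := hsub hc
      simp only [Finset.mem_sdiff, List.mem_toFinset, List.mem_append, List.mem_singleton] at h2
      exact h2.2 (by simp)

-- ===== PORT A =====
-- A's recursive visit; fuel is a totality guard only (it provably never runs out at the bound used below)
def pvVisitA (pt : List (String × List String)) :
    Nat → List String → List String → List String → List String × List String
  | _, [], v, o => (v, o)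
  | f, c :: cs, v, o =>
    if c ∈ v then pvVisitA pt f cs v o
    else
      match f with
      | 0 => (v, o)
      | f' + 1 =>
        pvVisitA pt (f' + 1) cs
          (pvVisitA pt f' (pvSortedChildren pt c) (PySem.Set.add v c) (o ++ [c])).1
          (pvVisitA pt f' (pvSortedChildren pt c) (PySem.Set.add v c) (o ++ [c])).2
  termination_by f cs _ _ => (f, cs.length)

def find_recursive_children (code_id : String) (parent_to_children : List (String × List String)) : List String :=
  (pvVisitA parent_to_children ((pvU parent_to_children).length + 1)
    (pvSortedChildren parent_to_children code_id) PySem.Set.empty []).2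

def find_recursive_children_alt (code_id : String) (parent_to_children : List (String × List String)) : List String :=
  (pvStepB parent_to_children [pvSortedChildren parent_to_children code_id] PySem.Set.empty []).2

-- ===== PRECONDITION & SPEC =====
def Spec_find_recursive_children (code_id : String) (parent_to_children : List (String × List String)) (out : List String) : Prop := out = find_recursive_children_alt code_id parent_to_children
instance (code_id : String) (parent_to_children : List (String × List String)) (out : List String) : Decidable (Spec_find_recursive_children code_id parent_to_children out) := by unfold Spec_find_recursive_children; infer_instance

-- ===== CLAIM (what is proved, stated in full; the proofs are below) =====
def Claim_equal_find_recursive_children : Prop := ∀ (code_id : String) (parent_to_children : List (String × List String)), Dom_find_recursive_children code_id parent_to_children → Spec_find_recursive_children code_id parent_to_children (find_recursive_children code_id parent_to_children)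

-- ===== LEMMAS AND PROOFS =====

-- how many children values are not yet visited
def pvCard (pt : List (String × List String)) (v : List String) : Nat :=
  (((pvU pt).toFinset) \ v.toFinset).card

theorem pvCard_mono (pt : List (String × List String)) {v v' : List String}
    (h : ∀ x ∈ v, x ∈ v') : pvCard pt v' ≤ pvCard pt v := by
  apply Finset.card_le_card
  apply Finset.sdiff_subset_sdiff (Finset.Subset.refl _)
  intro x hx
  simp only [List.mem_toFinset] at hx ⊢
  exact h x hx

theorem pvCard_append (pt : List (String × List String)) {v : List String} {c : String}
    (hcU : c ∈ pvU pt) (hcv : c ∉ v) : pvCard pt (v ++ [c]) + 1 = pvCard pt v := by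
  have hset : (pvU pt).toFinset \ (v ++ [c]).toFinset
      = ((pvU pt).toFinset \ v.toFinset).erase c := by
    ext x
    simp only [Finset.mem_sdiff, Finset.mem_erase, List.mem_toFinset, List.mem_append,
      List.mem_singleton]
    tauto
  rw [pvCard, hset, Finset.card_erase_of_mem (by simp [hcU, hcv])]
  have hpos : 0 < pvCard pt v := by
    apply Finset.card_pos.mpr
    exact ⟨c, by simp [hcU, hcv]⟩
  simp only [pvCard] at hpos ⊢
  omega

theorem pvVisitA_subset (pt : List (String × List String)) (f : Nat)
    (cs v o : List String) : ∀ x ∈ v, x ∈ (pvVisitA pt f cs v o).1 := by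
  induction f, cs, v, o using pvVisitA.induct pt with
  | case1 f v o => intro x hx; simpa [pvVisitA] using hx
  | case2 f c cs v o hmem ih =>
    intro x hx
    have he : pvVisitA pt f (c :: cs) v o = pvVisitA pt f cs v o := by
      rw [pvVisitA.eq_def]; simp [hmem]
    rw [he]
    exact ih x hx
  | case3 c cs v o hmem =>
    intro x hx
    have he : pvVisitA pt 0 (c :: cs) v o = (v, o) := by
      rw [pvVisitA.eq_def]; simp [hmem]
    rw [he]
    exact hx
  | case4 c cs v o hmem f' ih1 ih2 =>
    intro x hx
    have he : pvVisitA pt (f' + 1) (c :: cs) v o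
        = pvVisitA pt (f' + 1) cs
            (pvVisitA pt f' (pvSortedChildren pt c) (PySem.Set.add v c) (o ++ [c])).1
            (pvVisitA pt f' (pvSortedChildren pt c) (PySem.Set.add v c) (o ++ [c])).2 := by
      rw [pvVisitA.eq_def]; simp [hmem]
    rw [he]
    apply ih2
    apply ih1
    simp [PySem.Set.add, PySem.Set.contains, hmem, hx]

theorem pvSim (pt : List (String × List String)) (f : Nat) (cs v o : List String) :
    ∀ stk : List (List String), (∀ x ∈ cs, x ∈ pvU pt) → pvCard pt v < f →
      pvStepB pt (cs :: stk) v o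
        = pvStepB pt stk (pvVisitA pt f cs v o).1 (pvVisitA pt f cs v o).2 := by
  induction f, cs, v, o using pvVisitA.induct pt with
  | case1 f v o =>
    intro stk _ _
    have he : pvVisitA pt f [] v o = (v, o) := by rw [pvVisitA]
    rw [he, pvStepB]
  | case2 f c cs v o hmem ih =>
    intro stk hcs hf
    have he : pvVisitA pt f (c :: cs) v o = pvVisitA pt f cs v o := by
      rw [pvVisitA.eq_def]; simp [hmem]
    have hs : pvStepB pt ((c :: cs) :: stk) v o = pvStepB pt (cs :: stk) v o := by
      rw [pvStepB.eq_def]; simp [hmem]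
    rw [he, hs]
    exact ih stk (fun x hx => hcs x (List.mem_cons_of_mem c hx)) hf
  | case3 c cs v o hmem =>
    intro stk hcs hf
    omega
  | case4 c cs v o hmem f' ih1 ih2 =>
    intro stk hcs hf
    have hcU : c ∈ pvU pt := hcs c List.mem_cons_self
    have hadd : PySem.Set.add v c = v ++ [c] := by
      simp [PySem.Set.add, PySem.Set.contains, hmem]
    have hcard : pvCard pt (v ++ [c]) + 1 = pvCard pt v := pvCard_append pt hcU hmem
    have he : pvVisitA pt (f' + 1) (c :: cs) v o
        = pvVisitA pt (f' + 1) cs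
            (pvVisitA pt f' (pvSortedChildren pt c) (PySem.Set.add v c) (o ++ [c])).1
            (pvVisitA pt f' (pvSortedChildren pt c) (PySem.Set.add v c) (o ++ [c])).2 := by
      rw [pvVisitA.eq_def]; simp [hmem]
    have hs : pvStepB pt ((c :: cs) :: stk) v o
        = pvStepB pt (pvSortedChildren pt c :: cs :: stk) (PySem.Set.add v c) (o ++ [c]) := by
      rw [pvStepB.eq_def]; simp [hmem]
    rw [he, hs]
    rw [ih1 (cs :: stk) (pvSortedChildren_subset pt c) (by rw [hadd]; omega)]
    have hsub : ∀ x ∈ v ++ [c],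
        x ∈ (pvVisitA pt f' (pvSortedChildren pt c) (PySem.Set.add v c) (o ++ [c])).1 := by
      intro x hx
      exact pvVisitA_subset pt f' (pvSortedChildren pt c) (PySem.Set.add v c) (o ++ [c]) x
        (by rw [hadd]; exact hx)
    have hst := pvCard_mono pt hsub
    exact ih2 stk (fun x hx => hcs x (List.mem_cons_of_mem c hx)) (by omega)

theorem pvMain (code_id : String) (pt : List (String × List String)) :
    find_recursive_children code_id pt = find_recursive_children_alt code_id pt := by
  rw [find_recursive_children, find_recursive_children_alt]
  rw [pvSim pt ((pvU pt).length + 1) (pvSortedChildren pt code_id) PySem.Set.empty []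
    [] (pvSortedChildren_subset pt code_id) ?_]
  · rw [pvStepB]
  · have h1 : pvCard pt PySem.Set.empty ≤ (pvU pt).length :=
      le_trans (Finset.card_le_card Finset.sdiff_subset) (List.toFinset_card_le _)
    omega

-- ===== VERDICT (by name: the statement is the Claim_ definition above) =====
theorem find_recursive_children_spec : Claim_equal_find_recursive_children := by
  intro code_id pt _
  unfold Spec_find_recursive_children
  exact pvMain code_id pt
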